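-- pv_equiv track=rewrite | github.com/GH-Lim/AlgorithmPractice | problems/test4/01.py | solution
-- ===== SOURCE A (Python) =====
-- def solution(inputString):
--     answer = 0
--     stack1 = []
--     stack2 = []
--     stack3 = []
--     stack4 = []
--     for s in inputString:
--         if s == "(":
--             stack1.append(1)
--         elif s == "{":
--             stack2.append(2)
--         elif s == "[":
--             stack3.append(3)
--         elif s == "<":
--             stack4.append(4)
--         elif s == ")":
--             if len(stack1):
--                 stack1.pop()
--                 answer += 1
--             else:
--                 answer = -1
--                 break
--         elif s == "}":
--             if len(stack2):
--                 stack2.pop()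
--                 answer += 1
--             else:
--                 answer = -1
--                 break
--         elif s == "]":
--             if len(stack3):
--                 stack3.pop()
--                 answer += 1
--             else:
--                 answer = -1
--                 break
--         elif s == ">":
--             if len(stack4):
--                 stack4.pop()
--                 answer += 1
--             else:
--                 answer = -1
--                 break
--     if stack1: answer = -1
--     if stack2: answer = -1
--     if stack3: answer = -1
--     if stack4: answer = -1
--
--     return answer
-- ===== SOURCE B (Python) =====
-- def _count_pair(s, op, cl):
--     bal = 0
--     cnt = 0
--     for ch in s:
--         if ch == op:
--             bal += 1
--         elif ch == cl:
--             if bal == 0: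
--                 return None
--             bal -= 1
--             cnt += 1
--     if bal > 0:
--         return None
--     return cnt
--
--
-- def solution(inputString):
--     total = 0
--     for op, cl in (("(", ")"), ("{", "}"), ("[", "]"), ("<", ">")):
--         c = _count_pair(inputString, op, cl)
--         if c is None:
--             return -1
--         total += c
--     return total
-- ===== Notes on version B (the rewrite author's own statement) =====
-- stated objective: simpler
-- what changed: Replaces A's single loop carrying four explicit stacks plus post-loop checks by a small helper that counts matched pairs of one bracket type with an integer balance, called once per bracket type and summed.
import Mathlib
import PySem

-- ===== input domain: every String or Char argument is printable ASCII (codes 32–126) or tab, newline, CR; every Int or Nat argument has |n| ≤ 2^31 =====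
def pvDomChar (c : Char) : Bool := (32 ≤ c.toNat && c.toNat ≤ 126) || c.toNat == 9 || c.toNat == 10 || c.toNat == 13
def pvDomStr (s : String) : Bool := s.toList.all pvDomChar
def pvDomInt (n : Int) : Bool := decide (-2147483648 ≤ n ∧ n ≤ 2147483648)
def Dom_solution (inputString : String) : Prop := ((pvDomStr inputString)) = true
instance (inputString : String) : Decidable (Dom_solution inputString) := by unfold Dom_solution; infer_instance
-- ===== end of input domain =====

-- B re-decomposes A's single-pass four-stack loop into four independent per-bracket-type
-- balance-counting scans (objective: simpler); same return values, no mutation involved.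


-- ===== PORT A =====
-- loop over the characters carrying (answer, stack1, stack2, stack3, stack4);
-- a failing close breaks out of the loop with answer = -1
def loopA : List Char → Int → List Int → List Int → List Int → List Int →
    Int × List Int × List Int × List Int × List Int
  | [], a, s1, s2, s3, s4 => (a, s1, s2, s3, s4)
  | ch :: rest, a, s1, s2, s3, s4 =>
    if ch = '(' then loopA rest a (s1 ++ [1]) s2 s3 s4
    else if ch = '{' then loopA rest a s1 (s2 ++ [2]) s3 s4
    else if ch = '[' then loopA rest a s1 s2 (s3 ++ [3]) s4
    else if ch = '<' then loopA rest a s1 s2 s3 (s4 ++ [4])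
    else if ch = ')' then
      if s1.length ≠ 0 then loopA rest (a + 1) s1.dropLast s2 s3 s4
      else (-1, s1, s2, s3, s4)
    else if ch = '}' then
      if s2.length ≠ 0 then loopA rest (a + 1) s1 s2.dropLast s3 s4
      else (-1, s1, s2, s3, s4)
    else if ch = ']' then
      if s3.length ≠ 0 then loopA rest (a + 1) s1 s2 s3.dropLast s4
      else (-1, s1, s2, s3, s4)
    else if ch = '>' then
      if s4.length ≠ 0 then loopA rest (a + 1) s1 s2 s3 s4.dropLast
      else (-1, s1, s2, s3, s4)
    else loopA rest a s1 s2 s3 s4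

-- the four trailing "if stackN: answer = -1" statements
def postA (r : Int × List Int × List Int × List Int × List Int) : Int :=
  let a := if r.2.1 ≠ [] then -1 else r.1
  let a := if r.2.2.1 ≠ [] then -1 else a
  let a := if r.2.2.2.1 ≠ [] then -1 else a
  if r.2.2.2.2 ≠ [] then -1 else a

def solution (inputString : String) : Int :=
  postA (loopA inputString.toList 0 [] [] [] [])

-- ===== PORT B =====
-- _count_pair: scan the whole string for ONE bracket type, counting matched pairs;
-- none = failure (premature close or unclosed opens)
def countPair : List Char → Char → Char → Int → Int → Option Int
  | [], _, _, bal, cnt => if bal > 0 then none else some cnt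
  | ch :: rest, op, cl, bal, cnt =>
    if ch = op then countPair rest op cl (bal + 1) cnt
    else if ch = cl then
      if bal = 0 then none else countPair rest op cl (bal - 1) (cnt + 1)
    else countPair rest op cl bal cnt

def solution_alt (inputString : String) : Int :=
  match countPair inputString.toList '(' ')' 0 0,
        countPair inputString.toList '{' '}' 0 0,
        countPair inputString.toList '[' ']' 0 0,
        countPair inputString.toList '<' '>' 0 0 with
  | some c1, some c2, some c3, some c4 => c1 + c2 + c3 + c4
  | _, _, _, _ => -1

-- ===== PRECONDITION & SPEC =====
def Spec_solution (inputString : String) (out : Int) : Prop := out = solution_alt inputString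
instance (inputString : String) (out : Int) : Decidable (Spec_solution inputString out) := by unfold Spec_solution; infer_instance

-- ===== CLAIM (what is proved, stated in full; the proofs are below) =====
def Claim_equal_solution : Prop := ∀ (inputString : String), Dom_solution inputString → Spec_solution inputString (solution inputString)

-- ===== LEMMAS AND PROOFS =====

-- accumulator lemma: the count parameter is a pure offset
theorem countPair_shift (cs : List Char) (op cl : Char) (bal cnt : Int) :
    countPair cs op cl bal cnt = (countPair cs op cl bal 0).map (· + cnt) := by
  induction cs generalizing bal cnt with
  | nil => simp [countPair]; split <;> simp
  | cons ch rest ih =>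
    simp only [countPair]
    split
    · exact ih _ _
    · split
      · split
        · simp
        · simp only [zero_add]
          rw [ih _ (cnt + 1), ih _ 1]
          cases countPair rest op cl (bal - 1) 0 <;> simp <;> ring
      · exact ih _ _

-- one-step unfolding lemmas for countPair
theorem countPair_open {ch op cl : Char} {rest : List Char} {bal cnt : Int}
    (h : ch = op) :
    countPair (ch :: rest) op cl bal cnt = countPair rest op cl (bal + 1) cnt := by
  simp [countPair, h]

theorem countPair_close {ch op cl : Char} {rest : List Char} {bal cnt : Int}
    (hop : ch ≠ op) (hcl : ch = cl) (hb : bal ≠ 0) :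
    countPair (ch :: rest) op cl bal cnt = countPair rest op cl (bal - 1) (cnt + 1) := by
  subst hcl; simp [countPair, hop, hb]

theorem countPair_skip {ch op cl : Char} {rest : List Char} {bal cnt : Int}
    (hop : ch ≠ op) (hcl : ch ≠ cl) :
    countPair (ch :: rest) op cl bal cnt = countPair rest op cl bal cnt := by
  simp [countPair, hop, hcl]

-- main invariant: the post-adjusted A loop from any state equals the combination of
-- the four per-type scans started with balances = the stack lengths
theorem main_inv (cs : List Char) (a : Int) (s1 s2 s3 s4 : List Int) :
    postA (loopA cs a s1 s2 s3 s4) =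
      (match countPair cs '(' ')' s1.length 0, countPair cs '{' '}' s2.length 0,
             countPair cs '[' ']' s3.length 0, countPair cs '<' '>' s4.length 0 with
       | some c1, some c2, some c3, some c4 => a + c1 + c2 + c3 + c4
       | _, _, _, _ => -1) := by
  induction cs generalizing a s1 s2 s3 s4 with
  | nil =>
    cases s1 <;> cases s2 <;> cases s3 <;> cases s4 <;>
      simp [loopA, countPair, postA]
  | cons ch rest ih =>
    by_cases h1 : ch = '('
    · subst h1
      have hlen : (((s1 ++ [1]).length : Nat) : Int) = (s1.length : Int) + 1 := by
        simp
      rw [show loopA ('(' :: rest) a s1 s2 s3 s4 = loopA rest a (s1 ++ [1]) s2 s3 s4 by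
            simp [loopA],
          ih, hlen, countPair_open rfl, countPair_skip (by decide) (by decide),
          countPair_skip (by decide) (by decide), countPair_skip (by decide) (by decide)]
    by_cases h2 : ch = '{'
    · subst h2
      have hlen : (((s2 ++ [2]).length : Nat) : Int) = (s2.length : Int) + 1 := by
        simp
      rw [show loopA ('{' :: rest) a s1 s2 s3 s4 = loopA rest a s1 (s2 ++ [2]) s3 s4 by
            simp [loopA],
          ih, hlen, countPair_open rfl, countPair_skip (by decide) (by decide),
          countPair_skip (by decide) (by decide), countPair_skip (by decide) (by decide)]
    by_cases h3 : ch = '['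
    · subst h3
      have hlen : (((s3 ++ [3]).length : Nat) : Int) = (s3.length : Int) + 1 := by
        simp
      rw [show loopA ('[' :: rest) a s1 s2 s3 s4 = loopA rest a s1 s2 (s3 ++ [3]) s4 by
            simp [loopA],
          ih, hlen, countPair_open rfl, countPair_skip (by decide) (by decide),
          countPair_skip (by decide) (by decide), countPair_skip (by decide) (by decide)]
    by_cases h4 : ch = '<'
    · subst h4
      have hlen : (((s4 ++ [4]).length : Nat) : Int) = (s4.length : Int) + 1 := by
        simp
      rw [show loopA ('<' :: rest) a s1 s2 s3 s4 = loopA rest a s1 s2 s3 (s4 ++ [4]) by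
            simp [loopA],
          ih, hlen, countPair_open rfl, countPair_skip (by decide) (by decide),
          countPair_skip (by decide) (by decide), countPair_skip (by decide) (by decide)]
    by_cases h5 : ch = ')'
    · subst h5
      rcases s1 with _ | ⟨x, t⟩
      · simp [loopA, countPair, postA]
      · have hb : (((x :: t).length : Nat) : Int) ≠ 0 := by simp; omega
        have hdl : (((x :: t).dropLast.length : Nat) : Int) = (((x :: t).length : Nat) : Int) - 1 := by
          simp [List.length_dropLast]
        rw [show loopA (')' :: rest) a (x :: t) s2 s3 s4
              = loopA rest (a + 1) (x :: t).dropLast s2 s3 s4 by simp [loopA],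
            ih, hdl, countPair_close (by decide) rfl hb, countPair_skip (by decide) (by decide),
            countPair_skip (by decide) (by decide), countPair_skip (by decide) (by decide),
            countPair_shift rest '(' ')' ((((x :: t).length : Nat) : Int) - 1) (0 + 1)]
        cases countPair rest '(' ')' ((((x :: t).length : Nat) : Int) - 1) 0 <;>
          cases countPair rest '{' '}' ((s2.length : Nat) : Int) 0 <;>
          cases countPair rest '[' ']' ((s3.length : Nat) : Int) 0 <;>
          cases countPair rest '<' '>' ((s4.length : Nat) : Int) 0 <;> simp <;> ring
    by_cases h6 : ch = '}'
    · subst h6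
      rcases s2 with _ | ⟨x, t⟩
      · simp [loopA, countPair, postA]
      · have hb : (((x :: t).length : Nat) : Int) ≠ 0 := by simp; omega
        have hdl : (((x :: t).dropLast.length : Nat) : Int) = (((x :: t).length : Nat) : Int) - 1 := by
          simp [List.length_dropLast]
        rw [show loopA ('}' :: rest) a s1 (x :: t) s3 s4
              = loopA rest (a + 1) s1 (x :: t).dropLast s3 s4 by simp [loopA],
            ih, hdl, countPair_close (by decide) rfl hb, countPair_skip (by decide) (by decide),
            countPair_skip (by decide) (by decide), countPair_skip (by decide) (by decide),
            countPair_shift rest '{' '}' ((((x :: t).length : Nat) : Int) - 1) (0 + 1)]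
        cases countPair rest '(' ')' ((s1.length : Nat) : Int) 0 <;>
          cases countPair rest '{' '}' ((((x :: t).length : Nat) : Int) - 1) 0 <;>
          cases countPair rest '[' ']' ((s3.length : Nat) : Int) 0 <;>
          cases countPair rest '<' '>' ((s4.length : Nat) : Int) 0 <;> simp <;> ring
    by_cases h7 : ch = ']'
    · subst h7
      rcases s3 with _ | ⟨x, t⟩
      · simp [loopA, countPair, postA]
      · have hb : (((x :: t).length : Nat) : Int) ≠ 0 := by simp; omega
        have hdl : (((x :: t).dropLast.length : Nat) : Int) = (((x :: t).length : Nat) : Int) - 1 := by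
          simp [List.length_dropLast]
        rw [show loopA (']' :: rest) a s1 s2 (x :: t) s4
              = loopA rest (a + 1) s1 s2 (x :: t).dropLast s4 by simp [loopA],
            ih, hdl, countPair_close (by decide) rfl hb, countPair_skip (by decide) (by decide),
            countPair_skip (by decide) (by decide), countPair_skip (by decide) (by decide),
            countPair_shift rest '[' ']' ((((x :: t).length : Nat) : Int) - 1) (0 + 1)]
        cases countPair rest '(' ')' ((s1.length : Nat) : Int) 0 <;>
          cases countPair rest '{' '}' ((s2.length : Nat) : Int) 0 <;>
          cases countPair rest '[' ']' ((((x :: t).length : Nat) : Int) - 1) 0 <;>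
          cases countPair rest '<' '>' ((s4.length : Nat) : Int) 0 <;> simp <;> ring
    by_cases h8 : ch = '>'
    · subst h8
      rcases s4 with _ | ⟨x, t⟩
      · simp [loopA, countPair, postA]
      · have hb : (((x :: t).length : Nat) : Int) ≠ 0 := by simp; omega
        have hdl : (((x :: t).dropLast.length : Nat) : Int) = (((x :: t).length : Nat) : Int) - 1 := by
          simp [List.length_dropLast]
        rw [show loopA ('>' :: rest) a s1 s2 s3 (x :: t)
              = loopA rest (a + 1) s1 s2 s3 (x :: t).dropLast by simp [loopA],
            ih, hdl, countPair_close (by decide) rfl hb, countPair_skip (by decide) (by decide),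
            countPair_skip (by decide) (by decide), countPair_skip (by decide) (by decide),
            countPair_shift rest '<' '>' ((((x :: t).length : Nat) : Int) - 1) (0 + 1)]
        cases countPair rest '(' ')' ((s1.length : Nat) : Int) 0 <;>
          cases countPair rest '{' '}' ((s2.length : Nat) : Int) 0 <;>
          cases countPair rest '[' ']' ((s3.length : Nat) : Int) 0 <;>
          cases countPair rest '<' '>' ((((x :: t).length : Nat) : Int) - 1) 0 <;> simp <;> ring
    · rw [show loopA (ch :: rest) a s1 s2 s3 s4 = loopA rest a s1 s2 s3 s4 by
            simp [loopA, h1, h2, h3, h4, h5, h6, h7, h8],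
          ih, countPair_skip h1 h5, countPair_skip h2 h6, countPair_skip h3 h7,
          countPair_skip h4 h8]

-- ===== VERDICT (by name: the statement is the Claim_ definition above) =====
theorem solution_spec : Claim_equal_solution := by
  intro s _
  unfold Spec_solution solution solution_alt
  simpa using main_inv s.toList 0 [] [] [] []
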